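-- pv_equiv track=rewrite | github.com/zactodd/ProjectEuler | Answers/101to200/151to160/question153.py | gaussian_sigma
-- ===== SOURCE A (Python) =====
-- import math
--
-- def arithmetic_series(lower_bound, upper_bound, step=1):
--     return (step + upper_bound) * (upper_bound // step) // 2 - (step + lower_bound) * (lower_bound // step) // 2
--
-- def gaussian_sigma(n):
--     rv, i = 0, 1
--     while 2 * i <= n:
--         q = n // (2 * i)
--         min_i, max_i = n // (q + 1) - n // (q + 1) % 2, n // q - n // q % 2
--         rv += arithmetic_series(min_i, max_i, 2) * q
--         i += (max_i - min_i) // 2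
--     for a in range(1, int(math.sqrt(n))):
--         for b in range(a + 1, math.ceil(math.sqrt(n - a ** 2))):
--             c = a ** 2 + b ** 2
--             if math.gcd(a, b) > 1:
--                 continue
--             i = 1
--             while c * i <= n:
--                 q = n // (c * i)
--                 min_i, max_i = n // (q + 1) - n // (q + 1) % c, n // q - n // q % c
--                 rv += arithmetic_series(min_i // c, max_i // c) * q * 2 * (a + b)
--                 i += (max_i - min_i) // c
--     return rv
-- ===== SOURCE B (Python) =====
-- import math
--
-- def gaussian_sigma(n):
--     total = 0
--     k = 2
--     while k <= n:
--         total += k * (n // k)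
--         k += 2
--     a = 1
--     while a * a < n:
--         b = a + 1
--         while a * a + b * b < n:
--             if math.gcd(a, b) == 1:
--                 c = a * a + b * b
--                 i = 1
--                 while c * i <= n:
--                     total += 2 * (a + b) * i * (n // (c * i))
--                     i += 1
--             b += 1
--         a += 1
--     return total
-- ===== Notes on version B (the rewrite author's own statement) =====
-- stated objective: simpler
-- what changed: Replaces A's hyperbola block-partition loops (arithmetic_series over blocks of equal floor-quotient, with sqrt/ceil-derived block edges) by plain direct summation: one term per even k <= n and per multiple c*i <= n of each coprime pair's norm, with elementary while-loop bounds a*a < n and a*a + b*b < n instead of float sqrt/ceil range ends.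
import Mathlib
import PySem

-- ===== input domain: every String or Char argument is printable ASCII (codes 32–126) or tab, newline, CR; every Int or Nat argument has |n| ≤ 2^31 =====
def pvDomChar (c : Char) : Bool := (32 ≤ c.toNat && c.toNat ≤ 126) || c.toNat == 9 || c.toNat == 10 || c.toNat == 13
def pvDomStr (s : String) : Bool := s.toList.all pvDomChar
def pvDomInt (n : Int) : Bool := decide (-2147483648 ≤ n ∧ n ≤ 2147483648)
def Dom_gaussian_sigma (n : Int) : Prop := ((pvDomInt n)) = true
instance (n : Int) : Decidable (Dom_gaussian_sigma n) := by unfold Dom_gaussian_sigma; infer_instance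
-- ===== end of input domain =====

-- B replaces A's hyperbola block-partition loops (arithmetic_series over floor-quotient
-- blocks, sqrt/ceil bounds) by plain direct summation over each divisor's multiples
-- (objective: simpler; not faster).

-- ===== PORT A =====
def arithmetic_series (lower upper step : Int) : Int :=
  PySem.Int.floordiv ((step + upper) * PySem.Int.floordiv upper step) 2 -
  PySem.Int.floordiv ((step + lower) * PySem.Int.floordiv lower step) 2

-- int(math.sqrt(m)): exact on the |m| ≤ 2^31 domain (the double sqrt is correctly rounded
-- and m is exactly representable there, so int(...) is the integer square root)
def pyIntSqrt (m : Int) : Int := (Nat.sqrt m.toNat : Int)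

-- math.ceil(math.sqrt(m)), exact on the same domain
def pyCeilSqrt (m : Int) : Int :=
  let s : Int := (Nat.sqrt m.toNat : Int)
  if s * s = m then s else s + 1

-- the 'while 2 * i <= n' loop of A (fuel: the loop counter i strictly grows each pass)
def asLoop1 (n : Int) : Nat → Int → Int → Int
  | 0, rv, _ => rv
  | fuel+1, rv, i =>
    if 2*i ≤ n then
      let q := PySem.Int.floordiv n (2*i)
      let mn := PySem.Int.floordiv n (q+1) - PySem.Int.mod (PySem.Int.floordiv n (q+1)) 2
      let mx := PySem.Int.floordiv n q - PySem.Int.mod (PySem.Int.floordiv n q) 2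
      asLoop1 n fuel (rv + arithmetic_series mn mx 2 * q) (i + PySem.Int.floordiv (mx - mn) 2)
    else rv

-- the inner 'while c * i <= n' loop of A
def asLoop2 (n c a b : Int) : Nat → Int → Int → Int
  | 0, rv, _ => rv
  | fuel+1, rv, i =>
    if c*i ≤ n then
      let q := PySem.Int.floordiv n (c*i)
      let mn := PySem.Int.floordiv n (q+1) - PySem.Int.mod (PySem.Int.floordiv n (q+1)) c
      let mx := PySem.Int.floordiv n q - PySem.Int.mod (PySem.Int.floordiv n q) c
      asLoop2 n c a b fuel
        (rv + arithmetic_series (PySem.Int.floordiv mn c) (PySem.Int.floordiv mx c) 1 * q * 2 * (a+b))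
        (i + PySem.Int.floordiv (mx - mn) c)
    else rv

def gaussian_sigma (n : Int) : Int :=
  let rv := asLoop1 n (n.toNat + 1) 0 1
  (PySem.List.pyRange 1 (pyIntSqrt n) 1).foldl (fun rv a =>
    (PySem.List.pyRange (a+1) (pyCeilSqrt (n - a^2)) 1).foldl (fun rv b =>
      let c := a^2 + b^2
      if 1 < Int.gcd a b then rv
      else asLoop2 n c a b (n.toNat + 1) rv 1) rv) rv

-- ===== PORT B =====
-- direct sum over even k ≤ n of k * (n // k)
def altEvenLoop (n : Int) : Nat → Int → Int → Int
  | 0, total, _ => total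
  | fuel+1, total, k =>
    if k ≤ n then altEvenLoop n fuel (total + k * PySem.Int.floordiv n k) (k + 2)
    else total

-- direct sum over multiples c*i ≤ n of 2*(a+b)*i*(n // (c*i))
def altMulLoop (n c a b : Int) : Nat → Int → Int → Int
  | 0, total, _ => total
  | fuel+1, total, i =>
    if c * i ≤ n then
      altMulLoop n c a b fuel (total + 2*(a+b)*i * PySem.Int.floordiv n (c*i)) (i + 1)
    else total

def altBLoop (n a : Int) : Nat → Int → Int → Int
  | 0, total, _ => total
  | fuel+1, total, b =>
    if a*a + b*b < n then
      altBLoop n a fuel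
        (if Int.gcd a b = 1 then altMulLoop n (a*a + b*b) a b (n.toNat + 1) total 1 else total)
        (b + 1)
    else total

def altALoop (n : Int) : Nat → Int → Int → Int
  | 0, total, _ => total
  | fuel+1, total, a =>
    if a*a < n then altALoop n fuel (altBLoop n a (n.toNat + 1) total (a + 1)) (a + 1)
    else total

def gaussian_sigma_alt (n : Int) : Int :=
  altALoop n (n.toNat + 1) (altEvenLoop n (n.toNat + 1) 0 2) 1

-- ===== PRECONDITION & SPEC =====
-- A raises ValueError (math.sqrt of a negative number) for n < 0; Pre_ excludes exactly those.
def Pre_gaussian_sigma (n : Int) : Prop := 0 ≤ n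
instance (n : Int) : Decidable (Pre_gaussian_sigma n) := by unfold Pre_gaussian_sigma; infer_instance
def pvWitness_gaussian_sigma : Int := 10

def Spec_gaussian_sigma (n : Int) (out : Int) : Prop := out = gaussian_sigma_alt n
instance (n : Int) (out : Int) : Decidable (Spec_gaussian_sigma n out) := by unfold Spec_gaussian_sigma; infer_instance

-- ===== CLAIM (what is proved, stated in full; the proofs are below) =====
def Claim_equal_gaussian_sigma : Prop := ∀ (n : Int), Dom_gaussian_sigma n → Pre_gaussian_sigma n → Spec_gaussian_sigma n (gaussian_sigma n)

-- ===== LEMMAS AND PROOFS =====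

-- the common mathematical value both programs compute, written as Finset sums
noncomputable def innerP (n a b : Int) : Int :=
  ∑ x ∈ Finset.Ico 1 (n / (a*a + b*b) + 1), 2*(a+b)*x*(n / ((a*a + b*b)*x))

noncomputable def pairT (n a b : Int) : Int := if Int.gcd a b = 1 then innerP n a b else 0

-- largest t with t*t < m (i.e. 0 for m ≤ 1)
def sqB (m : Int) : Int := (Nat.sqrt (m-1).toNat : Int)

noncomputable def pairRow (n a : Int) : Int := ∑ b ∈ Finset.Ico (a+1) (sqB (n - a*a) + 1), pairT n a b

noncomputable def evenS (n : Int) : Int := ∑ j ∈ Finset.Ico 1 (n/2 + 1), 2*j*(n/(2*j))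

noncomputable def pairS (n : Int) : Int := ∑ a ∈ Finset.Ico 1 (sqB n + 1), pairRow n a

-- ---- generic facts ----

lemma sum_Ico_bot (s e : Int) (h : s < e) (g : Int → Int) :
    ∑ x ∈ Finset.Ico s e, g x = g s + ∑ x ∈ Finset.Ico (s+1) e, g x := by
  have hs : Finset.Ico s e = insert s (Finset.Ico (s+1) e) := by
    ext x; simp only [Finset.mem_Ico, Finset.mem_insert]; omega
  rw [hs, Finset.sum_insert (by simp only [Finset.mem_Ico]; omega)]

lemma sum_Ico_split (a b c : Int) (h1 : a ≤ b) (h2 : b ≤ c) (g : Int → Int) :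
    ∑ x ∈ Finset.Ico a c, g x = (∑ x ∈ Finset.Ico a b, g x) + ∑ x ∈ Finset.Ico b c, g x := by
  rw [← Finset.sum_union (Finset.Ico_disjoint_Ico_consecutive a b c),
    Finset.Ico_union_Ico_eq_Ico h1 h2]

lemma sum_Ico_singleton (M : Int) (g : Int → Int) : ∑ x ∈ Finset.Ico M (M+1), g x = g M := by
  have h1 : Finset.Ico M (M+1) = {M} := by
    ext x; simp only [Finset.mem_Ico, Finset.mem_singleton]; omega
  rw [h1, Finset.sum_singleton]

lemma gaussIco (i : Int) : ∀ (M : Int), i ≤ M →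
    2 * (∑ x ∈ Finset.Ico i M, x) = M*(M-1) - i*(i-1) := by
  intro M hM
  induction M, hM using Int.le_induction with
  | base => simp only [Finset.Ico_self, Finset.sum_empty]; ring
  | succ M hM ih =>
    rw [sum_Ico_split i M (M+1) hM (by omega), sum_Ico_singleton]
    linear_combination ih

lemma ediv_antitone (n d d' : Int) (hn : 0 ≤ n) (h0 : 0 < d) (h : d ≤ d') : n / d' ≤ n / d := by
  rw [Int.le_ediv_iff_mul_le h0]
  calc n / d' * d ≤ n / d' * d' := by
        have h2 : 0 ≤ n / d' := Int.ediv_nonneg hn (by omega)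
        nlinarith
    _ ≤ n := Int.ediv_mul_le n (by omega)

lemma le_sqB_iff (t m : Int) (ht : 1 ≤ t) : t ≤ sqB m ↔ t*t < m := by
  rcases le_or_gt 1 m with h1 | h1
  · have htn : ((t.toNat : Int)) = t := Int.toNat_of_nonneg (by omega)
    have hN : (((m-1).toNat : Int)) = m - 1 := Int.toNat_of_nonneg (by omega)
    unfold sqB
    rw [← Int.toNat_le, Nat.le_sqrt']
    constructor
    · intro h
      have h2 : ((t.toNat ^ 2 : Nat) : Int) ≤ (((m-1).toNat : Nat) : Int) := Int.ofNat_le.mpr h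
      push_cast [htn] at h2
      nlinarith
    · intro h
      have h3 : ((t.toNat ^ 2 : Nat) : Int) ≤ (((m-1).toNat : Nat) : Int) := by
        push_cast [htn]
        nlinarith
      exact_mod_cast h3
  · have hz : (m-1).toNat = 0 := by omega
    unfold sqB
    rw [hz]
    simp only [Nat.sqrt_zero, Nat.cast_zero]
    have h2 : 1 ≤ t*t := by nlinarith
    constructor <;> intro h <;> omega

-- ---- block facts for A's hyperbola loops (q := n / (c*i)) ----

lemma blk_q1 (n c i : Int) (hc : 0 < c) (hi : 1 ≤ i) (hci : c*i ≤ n) : 1 ≤ n / (c*i) := by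
  rw [Int.le_ediv_iff_mul_le (by nlinarith)]; nlinarith

lemma blk_up (n c i : Int) (hn : 0 ≤ n) (hc : 0 < c) (hi : 1 ≤ i) (hci : c*i ≤ n) :
    n / (n / (c*i) + 1) < c*i := by
  have hq1 : 1 ≤ n / (c*i) := blk_q1 n c i hc hi hci
  rw [Int.ediv_lt_iff_lt_mul (by omega)]
  have h2 : n < (n / (c*i) + 1) * (c*i) := Int.lt_ediv_add_one_mul_self n (by nlinarith)
  nlinarith [h2]

lemma blk_low (n c i : Int) (hn : 0 ≤ n) (hc : 0 < c) (hi : 1 ≤ i) (hci : c*i ≤ n) :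
    c*i ≤ n / (n / (c*i)) := by
  have hq1 : 1 ≤ n / (c*i) := blk_q1 n c i hc hi hci
  rw [Int.le_ediv_iff_mul_le (by omega)]
  have h2 : n / (c*i) * (c*i) ≤ n := Int.ediv_mul_le n (by nlinarith)
  nlinarith [h2]

lemma blk_mod (c y : Int) : y - y % c = c * (y / c) := by
  rw [Int.emod_def]; ring

lemma blk_mn (c x i : Int) (hc : 0 < c) (hlo : c*(i-1) ≤ x) (hhi : x < c*i) :
    x - x % c = c*(i-1) := by
  have h1 : x / c = i - 1 := by
    have ha : x / c < i := by
      rw [Int.ediv_lt_iff_lt_mul hc]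
      nlinarith
    have hb : i - 1 ≤ x / c := by
      rw [Int.le_ediv_iff_mul_le hc]
      nlinarith
    omega
  rw [Int.emod_def, h1]
  ring

lemma blk_iM (n c i : Int) (hn : 0 ≤ n) (hc : 0 < c) (hi : 1 ≤ i) (hci : c*i ≤ n) :
    i ≤ (n / (n / (c*i))) / c := by
  rw [Int.le_ediv_iff_mul_le hc, mul_comm]
  exact blk_low n c i hn hc hi hci

lemma blk_Mn (n c i : Int) (hn : 0 ≤ n) (hc : 0 < c) (hi : 1 ≤ i) (hci : c*i ≤ n) :
    (n / (n / (c*i))) / c ≤ n / c := by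
  have h1 : 1 ≤ n / (c*i) := blk_q1 n c i hc hi hci
  have : n / (n / (c*i)) ≤ n := by
    calc n / (n / (c*i)) ≤ n / 1 := ediv_antitone n 1 (n / (c*i)) hn one_pos h1
      _ = n := Int.ediv_one n
  exact Int.ediv_le_ediv hc this

lemma blk_const (n c j : Int) (hn : 0 ≤ n) (hc : 0 < c) (q : Int) (hq : 1 ≤ q)
    (hlo : n / (q+1) < c*j) (hhi : c*j ≤ n / q) : n / (c*j) = q := by
  have hcj : 0 < c*j := by
    have : 0 ≤ n / (q+1) := Int.ediv_nonneg hn (by omega)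
    omega
  apply le_antisymm
  · have h2 : n < c*j*(q+1) := by
      have := (Int.ediv_lt_iff_lt_mul (by omega : (0:Int) < q+1)).mp hlo
      nlinarith [this]
    have : n / (c*j) < q + 1 := by
      rw [Int.ediv_lt_iff_lt_mul hcj]
      nlinarith
    omega
  · rw [Int.le_ediv_iff_mul_le hcj]
    have := (Int.le_ediv_iff_mul_le (by omega : (0:Int) < q)).mp hhi
    nlinarith [this]

lemma blk_next (n c i : Int) (hn : 0 ≤ n) (hc : 0 < c) (hi : 1 ≤ i) (hci : c*i ≤ n)
    (h2 : c*((n / (n / (c*i))) / c + 1) ≤ n) :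
    c*((n / (n / (c*i))) / c) ≤ n / (n / (c*((n / (n / (c*i))) / c + 1)) + 1) := by
  have hq1 : 1 ≤ n / (c*i) := blk_q1 n c i hc hi hci
  set q := n / (c*i) with hqdef
  set y := n / q with hydef
  set M := y / c with hMdef
  have hM1 : i ≤ M := blk_iM n c i hn hc hi hci
  have hcM : c*M ≤ y := by
    have : M * c ≤ y := Int.ediv_mul_le y (by omega)
    nlinarith [this]
  set q' := n / (c*(M+1)) with hq'def
  have hq'1 : 1 ≤ q' := blk_q1 n c (M+1) hc (by omega) h2
  have hq'q : q' < q := by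
    by_contra hcon
    push Not at hcon
    have hA : c*(M+1) ≤ n / q' := blk_low n c (M+1) hn hc (by omega) h2
    have hB : n / q' ≤ n / q := ediv_antitone n q q' hn (by omega) hcon
    have hC : M + 1 ≤ y / c := by
      rw [Int.le_ediv_iff_mul_le hc]
      nlinarith [hA, hB]
    omega
  have hD : n / q ≤ n / (q' + 1) := ediv_antitone n (q'+1) q hn (by omega) (by omega)
  omega

-- ---- loop characterisations ----

lemma fd2 (x : Int) : PySem.Int.floordiv x 2 = x / 2 :=
  PySem.Int.floordiv_eq_ediv_of_pos (by norm_num)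

lemma md2 (x : Int) : PySem.Int.mod x 2 = x % 2 :=
  PySem.Int.mod_eq_emod_of_pos (by norm_num)

lemma fd1 (x : Int) : PySem.Int.floordiv x 1 = x := by
  rw [PySem.Int.floordiv_eq_ediv_of_pos one_pos, Int.ediv_one]

lemma arith_step2 (i M : Int) : arithmetic_series (2*(i-1)) (2*M) 2 = (1+M)*M - i*(i-1) := by
  unfold arithmetic_series
  simp only [fd2]
  rw [show (2:Int)*M / 2 = M from Int.mul_ediv_cancel_left _ (by norm_num),
    show (2:Int)*(i-1) / 2 = i - 1 from Int.mul_ediv_cancel_left _ (by norm_num),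
    show ((2:Int) + 2*M) * M = 2*((1+M)*M) from by ring,
    show ((2:Int) + (2*(i-1))) * (i-1) = 2*(i*(i-1)) from by ring,
    Int.mul_ediv_cancel_left _ (show (2:Int) ≠ 0 by norm_num),
    Int.mul_ediv_cancel_left _ (show (2:Int) ≠ 0 by norm_num)]

lemma arith_step1 (i M : Int) : 2 * arithmetic_series (i-1) M 1 = (1+M)*M - i*(i-1) := by
  unfold arithmetic_series
  simp only [fd1, fd2]
  obtain ⟨k, hk⟩ := Int.even_mul_succ_self M
  obtain ⟨l, hl⟩ := Int.even_mul_succ_self (i-1)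
  have h1 : ((1:Int) + M) * M = 2*k := by linear_combination hk
  have h2 : ((1:Int) + (i-1)) * (i-1) = 2*l := by linear_combination hl
  have e1 : ((1:Int) + M) * M / 2 = k := by
    rw [h1, Int.mul_ediv_cancel_left _ (show (2:Int) ≠ 0 by norm_num)]
  have e2 : ((1:Int) + (i-1)) * (i-1) / 2 = l := by
    rw [h2, Int.mul_ediv_cancel_left _ (show (2:Int) ≠ 0 by norm_num)]
  rw [e1, e2]
  linear_combination h2 - h1

lemma asLoop1_spec : ∀ (fuel : Nat) (n i rv : Int), 0 ≤ n → 1 ≤ i →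
    (2*i ≤ n → 2*(i-1) ≤ n / (n/(2*i) + 1)) →
    (n/2 + 1 - i).toNat < fuel →
    asLoop1 n fuel rv i = rv + ∑ j ∈ Finset.Ico i (n/2 + 1), 2*j*(n/(2*j)) := by
  intro fuel
  induction fuel with
  | zero => intro n i rv hn hi hinv hf; exact absurd hf (by omega)
  | succ fuel ih =>
    intro n i rv hn hi hinv hf
    simp only [asLoop1]
    by_cases hcond : 2*i ≤ n
    · rw [if_pos hcond]
      have hq1 : 1 ≤ n / (2*i) := blk_q1 n 2 i two_pos hi hcond
      have hfdq : PySem.Int.floordiv n (2*i) = n/(2*i) :=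
        PySem.Int.floordiv_eq_ediv_of_pos (by omega)
      rw [hfdq]
      set q := n / (2*i) with hqdef
      have hup : n / (q+1) < 2*i := blk_up n 2 i hn two_pos hi hcond
      have hlow : 2*i ≤ n / q := blk_low n 2 i hn two_pos hi hcond
      have hinv' := hinv hcond
      have hfdq1 : PySem.Int.floordiv n (q+1) = n/(q+1) :=
        PySem.Int.floordiv_eq_ediv_of_pos (by omega)
      have hfdqq : PySem.Int.floordiv n q = n/q :=
        PySem.Int.floordiv_eq_ediv_of_pos (by omega)
      rw [hfdq1, hfdqq]
      simp only [md2]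
      have hmn : n/(q+1) - (n/(q+1)) % 2 = 2*(i-1) := blk_mn 2 (n/(q+1)) i two_pos hinv' hup
      have hmx : n/q - (n/q) % 2 = 2*((n/q)/2) := blk_mod 2 (n/q)
      set M := (n/q)/2 with hMdef
      have hiM : i ≤ M := blk_iM n 2 i hn two_pos hi hcond
      have hMn2 : M ≤ n/2 := blk_Mn n 2 i hn two_pos hi hcond
      have h2M : 2*M ≤ n/q := by
        have := Int.emod_nonneg (n/q) (show (2:Int) ≠ 0 by norm_num)
        omega
      rw [hmn, hmx]
      have hinc : PySem.Int.floordiv (2*M - 2*(i-1)) 2 = M - (i-1) := by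
        rw [show 2*M - 2*(i-1) = 2*(M - (i-1)) from by ring, fd2,
          Int.mul_ediv_cancel_left _ (show (2:Int) ≠ 0 by norm_num)]
      rw [hinc, arith_step2 i M, show i + (M - (i-1)) = M + 1 from by ring]
      have hnext : 2*(M+1) ≤ n → 2*((M+1)-1) ≤ n / (n/(2*(M+1)) + 1) := by
        intro h2
        rw [show (M+1)-1 = M from by ring]
        exact blk_next n 2 i hn two_pos hi hcond (by omega)
      rw [ih n (M+1) _ hn (by omega) hnext (by omega)]
      have hsplit : ∑ j ∈ Finset.Ico i (n/2+1), 2*j*(n/(2*j))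
          = (∑ j ∈ Finset.Ico i (M+1), 2*j*(n/(2*j)))
            + ∑ j ∈ Finset.Ico (M+1) (n/2+1), 2*j*(n/(2*j)) :=
        sum_Ico_split i (M+1) (n/2+1) (by omega) (by omega) _
      have hconstsum : ∑ j ∈ Finset.Ico i (M+1), 2*j*(n/(2*j))
          = ∑ j ∈ Finset.Ico i (M+1), (2*q)*j := by
        apply Finset.sum_congr rfl
        intro j hj
        rw [Finset.mem_Ico] at hj
        rw [blk_const n 2 j hn two_pos q hq1 (by omega) (by omega)]
        ring
      have hgauss := gaussIco i (M+1) (by omega)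
      have hmul : ∑ j ∈ Finset.Ico i (M+1), (2*q)*j = ((1+M)*M - i*(i-1)) * q := by
        rw [← Finset.mul_sum]
        linear_combination q * hgauss
      rw [hsplit, hconstsum, hmul]
      ring
    · rw [if_neg hcond]
      have : n/2 < i := by rw [Int.ediv_lt_iff_lt_mul two_pos]; omega
      rw [Finset.Ico_eq_empty (by omega), Finset.sum_empty, add_zero]

lemma asLoop2_spec : ∀ (fuel : Nat) (n c a b i rv : Int), 0 ≤ n → 0 < c → 1 ≤ i →
    (c*i ≤ n → c*(i-1) ≤ n / (n/(c*i) + 1)) →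
    (n/c + 1 - i).toNat < fuel →
    asLoop2 n c a b fuel rv i = rv + ∑ x ∈ Finset.Ico i (n/c + 1), 2*(a+b)*x*(n/(c*x)) := by
  intro fuel
  induction fuel with
  | zero => intro n c a b i rv hn hc hi hinv hf; exact absurd hf (by omega)
  | succ fuel ih =>
    intro n c a b i rv hn hc hi hinv hf
    simp only [asLoop2]
    by_cases hcond : c*i ≤ n
    · rw [if_pos hcond]
      have hci : (0:Int) < c*i := by nlinarith
      have hq1 : 1 ≤ n / (c*i) := blk_q1 n c i hc hi hcond
      have hfdq : PySem.Int.floordiv n (c*i) = n/(c*i) :=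
        PySem.Int.floordiv_eq_ediv_of_pos hci
      rw [hfdq]
      set q := n / (c*i) with hqdef
      have hup : n / (q+1) < c*i := blk_up n c i hn hc hi hcond
      have hlow : c*i ≤ n / q := blk_low n c i hn hc hi hcond
      have hinv' := hinv hcond
      have hfdq1 : PySem.Int.floordiv n (q+1) = n/(q+1) :=
        PySem.Int.floordiv_eq_ediv_of_pos (by omega)
      have hfdqq : PySem.Int.floordiv n q = n/q :=
        PySem.Int.floordiv_eq_ediv_of_pos (by omega)
      rw [hfdq1, hfdqq]
      have hmdc : ∀ x : Int, PySem.Int.mod x c = x % c :=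
        fun x => PySem.Int.mod_eq_emod_of_pos hc
      simp only [hmdc]
      have hmn : n/(q+1) - (n/(q+1)) % c = c*(i-1) := blk_mn c (n/(q+1)) i hc hinv' hup
      have hmx : n/q - (n/q) % c = c*((n/q)/c) := blk_mod c (n/q)
      set M := (n/q)/c with hMdef
      have hiM : i ≤ M := blk_iM n c i hn hc hi hcond
      have hMnc : M ≤ n/c := blk_Mn n c i hn hc hi hcond
      have hcM : c*M ≤ n/q := by
        have := Int.emod_nonneg (n/q) (show c ≠ 0 by omega)
        omega
      rw [hmn, hmx]
      have hfmn : PySem.Int.floordiv (c*(i-1)) c = i - 1 := by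
        rw [PySem.Int.floordiv_eq_ediv_of_pos hc, Int.mul_ediv_cancel_left _ (show c ≠ 0 by omega)]
      have hfmx : PySem.Int.floordiv (c*M) c = M := by
        rw [PySem.Int.floordiv_eq_ediv_of_pos hc, Int.mul_ediv_cancel_left _ (show c ≠ 0 by omega)]
      have hinc : PySem.Int.floordiv (c*M - c*(i-1)) c = M - (i-1) := by
        rw [show c*M - c*(i-1) = c*(M - (i-1)) from by ring,
          PySem.Int.floordiv_eq_ediv_of_pos hc, Int.mul_ediv_cancel_left _ (show c ≠ 0 by omega)]
      rw [hfmn, hfmx, hinc, show i + (M - (i-1)) = M + 1 from by ring]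
      have hnext : c*(M+1) ≤ n → c*((M+1)-1) ≤ n / (n/(c*(M+1)) + 1) := by
        intro h2
        rw [show (M+1)-1 = M from by ring]
        exact blk_next n c i hn hc hi hcond (by omega)
      rw [ih n c a b (M+1) _ hn hc (by omega) hnext (by omega)]
      have hsplit : ∑ x ∈ Finset.Ico i (n/c+1), 2*(a+b)*x*(n/(c*x))
          = (∑ x ∈ Finset.Ico i (M+1), 2*(a+b)*x*(n/(c*x)))
            + ∑ x ∈ Finset.Ico (M+1) (n/c+1), 2*(a+b)*x*(n/(c*x)) :=
        sum_Ico_split i (M+1) (n/c+1) (by omega) (by omega) _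
      have hconstsum : ∑ x ∈ Finset.Ico i (M+1), 2*(a+b)*x*(n/(c*x))
          = ∑ x ∈ Finset.Ico i (M+1), (2*(a+b)*q)*x := by
        apply Finset.sum_congr rfl
        intro j hj
        rw [Finset.mem_Ico] at hj
        rw [blk_const n c j hn hc q hq1 (by nlinarith) (by nlinarith)]
        ring
      have hgauss := gaussIco i (M+1) (by omega)
      have hmul : ∑ x ∈ Finset.Ico i (M+1), (2*(a+b)*q)*x
          = arithmetic_series (i-1) M 1 * q * 2 * (a+b) := by
        rw [← Finset.mul_sum]
        have has := arith_step1 i M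
        linear_combination (a+b) * q * hgauss - (a+b) * q * has
      rw [hsplit, hconstsum, hmul]
      ring
    · rw [if_neg hcond]
      have : n/c < i := by rw [Int.ediv_lt_iff_lt_mul hc]; linarith [mul_comm i c]
      rw [Finset.Ico_eq_empty (by omega), Finset.sum_empty, add_zero]

lemma altEvenLoop_spec : ∀ (fuel : Nat) (n j total : Int), 0 ≤ n → 1 ≤ j →
    (n/2 + 1 - j).toNat < fuel →
    altEvenLoop n fuel total (2*j) = total + ∑ x ∈ Finset.Ico j (n/2 + 1), 2*x*(n/(2*x)) := by
  intro fuel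
  induction fuel with
  | zero => intro n j total hn hj hf; exact absurd hf (by omega)
  | succ fuel ih =>
    intro n j total hn hj hf
    simp only [altEvenLoop]
    by_cases hcond : 2*j ≤ n
    · rw [if_pos hcond]
      have hjn : j ≤ n/2 := by rw [Int.le_ediv_iff_mul_le two_pos]; omega
      have hfd : PySem.Int.floordiv n (2*j) = n/(2*j) := PySem.Int.floordiv_eq_ediv_of_pos (by omega)
      have h2 : 2*j + 2 = 2*(j+1) := by ring
      rw [hfd, h2, ih n (j+1) _ hn (by omega) (by omega),
        sum_Ico_bot j (n/2+1) (by omega)]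
      ring
    · rw [if_neg hcond]
      have : n/2 < j := by rw [Int.ediv_lt_iff_lt_mul two_pos]; omega
      rw [Finset.Ico_eq_empty (by omega), Finset.sum_empty, add_zero]

lemma altMulLoop_spec : ∀ (fuel : Nat) (n c a b i total : Int), 0 ≤ n → 0 < c → 1 ≤ i →
    (n/c + 1 - i).toNat < fuel →
    altMulLoop n c a b fuel total i = total + ∑ x ∈ Finset.Ico i (n/c + 1), 2*(a+b)*x*(n/(c*x)) := by
  intro fuel
  induction fuel with
  | zero => intro n c a b i total hn hc hi hf; exact absurd hf (by omega)
  | succ fuel ih =>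
    intro n c a b i total hn hc hi hf
    simp only [altMulLoop]
    by_cases hcond : c*i ≤ n
    · rw [if_pos hcond]
      have hin : i ≤ n/c := by rw [Int.le_ediv_iff_mul_le hc]; linarith [mul_comm i c]
      have hfd : PySem.Int.floordiv n (c*i) = n/(c*i) := PySem.Int.floordiv_eq_ediv_of_pos (by nlinarith)
      rw [hfd, ih n c a b (i+1) _ hn hc (by omega) (by omega),
        sum_Ico_bot i (n/c+1) (by omega)]
      ring
    · rw [if_neg hcond]
      have : n/c < i := by rw [Int.ediv_lt_iff_lt_mul hc]; linarith [mul_comm i c]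
      rw [Finset.Ico_eq_empty (by omega), Finset.sum_empty, add_zero]

lemma altBLoop_spec : ∀ (fuel : Nat) (n a b total : Int), 0 ≤ n → 1 ≤ a → 1 ≤ b →
    (sqB (n - a*a) + 1 - b).toNat < fuel →
    altBLoop n a fuel total b = total + ∑ y ∈ Finset.Ico b (sqB (n - a*a) + 1), pairT n a y := by
  intro fuel
  induction fuel with
  | zero => intro n a b total hn ha hb hf; exact absurd hf (by omega)
  | succ fuel ih =>
    intro n a b total hn ha hb hf
    simp only [altBLoop]
    have hiff : b ≤ sqB (n - a*a) ↔ b*b < n - a*a := le_sqB_iff b (n - a*a) hb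
    by_cases hcond : a*a + b*b < n
    · rw [if_pos hcond]
      have hbs : b ≤ sqB (n - a*a) := hiff.mpr (by omega)
      have hcpos : 0 < a*a + b*b := by nlinarith
      have hdle : n / (a*a + b*b) ≤ n := Int.ediv_le_self _ hn
      have hbody : (if Int.gcd a b = 1 then altMulLoop n (a*a + b*b) a b (n.toNat + 1) total 1 else total)
          = total + pairT n a b := by
        by_cases hg : Int.gcd a b = 1
        · rw [if_pos hg,
            altMulLoop_spec (n.toNat+1) n (a*a+b*b) a b 1 total hn hcpos (le_refl 1) (by omega)]
          unfold pairT innerP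
          rw [if_pos hg]
        · rw [if_neg hg]
          unfold pairT
          rw [if_neg hg, add_zero]
      rw [hbody, ih n a (b+1) _ hn ha (by omega) (by omega),
        sum_Ico_bot b (sqB (n - a*a) + 1) (by omega)]
      ring
    · rw [if_neg hcond]
      have : sqB (n - a*a) < b := by omega
      rw [Finset.Ico_eq_empty (by omega), Finset.sum_empty, add_zero]

lemma altALoop_spec : ∀ (fuel : Nat) (n a total : Int), 0 ≤ n → 1 ≤ a →
    (sqB n + 1 - a).toNat < fuel →
    altALoop n fuel total a = total + ∑ x ∈ Finset.Ico a (sqB n + 1), pairRow n x := by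
  intro fuel
  induction fuel with
  | zero => intro n a total hn ha hf; exact absurd hf (by omega)
  | succ fuel ih =>
    intro n a total hn ha hf
    simp only [altALoop]
    have hiff : a ≤ sqB n ↔ a*a < n := le_sqB_iff a n ha
    by_cases hcond : a*a < n
    · rw [if_pos hcond]
      have haa : 0 ≤ a*a := mul_self_nonneg a
      have hsb : sqB (n - a*a) ≤ ((n - a*a - 1).toNat : Int) := by
        unfold sqB
        exact_mod_cast Nat.sqrt_le_self _
      rw [altBLoop_spec (n.toNat+1) n a (a+1) total hn ha (by omega) (by omega)]
      have hrow : total + ∑ y ∈ Finset.Ico (a+1) (sqB (n - a*a) + 1), pairT n a y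
          = total + pairRow n a := rfl
      rw [hrow, ih n (a+1) _ hn (by omega) (by omega),
        sum_Ico_bot a (sqB n + 1) (by omega)]
      ring
    · rw [if_neg hcond]
      have : sqB n < a := by omega
      rw [Finset.Ico_eq_empty (by omega), Finset.sum_empty, add_zero]

-- ---- pyRange sums and A's square-root bounds ----

lemma sum_map_pyRange (g : Int → Int) (s e : Int) :
    ((PySem.List.pyRange s e 1).map g).sum = ∑ x ∈ Finset.Ico s e, g x := by
  have key : ∀ (d : Nat) (s : Int),
      ((PySem.List.pyRange s (s + (d:Int)) 1).map g).sum = ∑ x ∈ Finset.Ico s (s + (d:Int)), g x := by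
    intro d
    induction d with
    | zero =>
      intro s
      rw [PySem.List.pyRange_one_eq_nil (by omega), Finset.Ico_eq_empty (by omega)]
      simp
    | succ d ihd =>
      intro s
      rw [PySem.List.pyRange_one_cons (by push_cast; omega), List.map_cons, List.sum_cons,
        sum_Ico_bot s _ (by push_cast; omega),
        show s + ((d+1 : Nat):Int) = (s+1) + (d:Int) from by push_cast; ring, ihd (s+1)]
  rcases le_or_gt e s with h | h
  · rw [PySem.List.pyRange_one_eq_nil h, Finset.Ico_eq_empty (by omega)]
    simp
  · rw [show e = s + ((e - s).toNat : Int) from by omega]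
    exact key _ s

lemma ceil_pred (m : Int) (hm : 1 ≤ m) : pyCeilSqrt m - 1 = sqB m := by
  unfold pyCeilSqrt sqB
  set s := Nat.sqrt m.toNat with hs
  have hle : (s*s : Nat) ≤ m.toNat := Nat.sqrt_le m.toNat
  have hlt : m.toNat < (s+1)*(s+1) := Nat.lt_succ_sqrt m.toNat
  by_cases hsq : ((s:Int))*(s:Int) = m
  · rw [if_pos hsq]
    have hss : ((s*s : Nat) : Int) = m := by push_cast; exact hsq
    have hs1 : 1 ≤ s := by
      rcases Nat.eq_zero_or_pos s with h0 | h1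
      · rw [h0] at hss; simp at hss; omega
      · exact h1
    have hmn : (m-1).toNat = s*s - 1 := by omega
    rw [hmn]
    have hsq1 : Nat.sqrt (s*s - 1) = s - 1 := by
      obtain ⟨t, ht⟩ : ∃ t, s = t+1 := ⟨s-1, by omega⟩
      rw [ht]
      have hexp : (t+1)*(t+1) = t*t + 2*t + 1 := by ring
      apply le_antisymm
      · have h2 : Nat.sqrt ((t+1)*(t+1) - 1) < t+1 := by
          rw [Nat.sqrt_lt']
          have hp : (t+1)^2 = (t+1)*(t+1) := pow_two _
          omega
        omega
      · rw [Nat.le_sqrt']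
        have ht1 : t+1-1 = t := by omega
        rw [ht1, pow_two]
        omega
    rw [hsq1]
    omega
  · rw [if_neg hsq]
    have hss : ((s*s : Nat) : Int) ≤ m := by omega
    have hssne : ((s*s : Nat) : Int) ≠ m := by push_cast; exact hsq
    have h1 : (s*s : Nat) ≤ (m-1).toNat := by omega
    have h2 : (m-1).toNat < (s+1)*(s+1) := by omega
    have hsqe : Nat.sqrt ((m-1).toNat) = s := by
      apply le_antisymm
      · have h3 : Nat.sqrt ((m-1).toNat) < s+1 := by
          rw [Nat.sqrt_lt']
          have : (s+1)^2 = (s+1)*(s+1) := pow_two _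
          omega
        omega
      · rw [Nat.le_sqrt']
        have : s^2 = s*s := pow_two _
        omega
    rw [hsqe]
    omega

lemma aRange_sq (n a : Int) (hn : 0 ≤ n) (ha : 1 ≤ a) (h : a ≤ pyIntSqrt n - 1) :
    1 ≤ n - a*a := by
  unfold pyIntSqrt at h
  have h1 : a + 1 ≤ (Nat.sqrt n.toNat : Int) := by omega
  have h2 : ((Nat.sqrt n.toNat * Nat.sqrt n.toNat : Nat) : Int) ≤ n := by
    have := Nat.sqrt_le n.toNat
    omega
  have h2' : ((Nat.sqrt n.toNat : Int)) * ((Nat.sqrt n.toNat : Int)) ≤ n := by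
    push_cast at h2
    exact h2
  nlinarith

lemma nat_sqrt_pred (N : Nat) : Nat.sqrt N - 1 ≤ Nat.sqrt (N - 1) := by
  rcases Nat.eq_zero_or_pos (Nat.sqrt N) with h0 | h1
  · omega
  · obtain ⟨t, ht⟩ : ∃ t, Nat.sqrt N = t+1 := ⟨_, (Nat.succ_pred_eq_of_pos h1).symm⟩
    have hle : (t+1)*(t+1) ≤ N := by
      rw [← ht]
      exact Nat.sqrt_le N
    have hkey : t ≤ Nat.sqrt (N-1) := by
      rw [Nat.le_sqrt']
      have hexp : (t+1)*(t+1) = t*t + 2*t + 1 := by ring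
      have hp : t^2 = t*t := pow_two _
      omega
    omega

lemma sqA_le_sqB (n : Int) (hn : 0 ≤ n) : pyIntSqrt n - 1 ≤ sqB n := by
  unfold pyIntSqrt sqB
  rw [show (n-1).toNat = n.toNat - 1 from by omega]
  have := nat_sqrt_pred n.toNat
  omega

lemma row_zero (n a : Int) (hn : 0 ≤ n) (ha : 1 ≤ a) (h : pyIntSqrt n ≤ a) : pairRow n a = 0 := by
  unfold pairRow
  have hempty : sqB (n - a*a) < a + 1 := by
    by_contra hcon
    push Not at hcon
    have hbig := (le_sqB_iff (a+1) (n - a*a) (by omega)).mp hcon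
    have hlt : n < (a+1)*(a+1) := by
      unfold pyIntSqrt at h
      set s := Nat.sqrt n.toNat with hs
      have h2 : n.toNat < (s + 1)*(s + 1) := Nat.lt_succ_sqrt n.toNat
      have h2' : ((( (s+1)*(s+1) : Nat)) : Int) = ((s:Int)+1)*((s:Int)+1) := by push_cast; ring
      have h4 : n < ((s:Int)+1)*((s:Int)+1) := by omega
      have h3 : ((s:Int)+1) ≤ a + 1 := by omega
      nlinarith
    nlinarith [mul_self_nonneg a]
  rw [Finset.Ico_eq_empty (by omega), Finset.sum_empty]

-- ---- the two programs against the common value ----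

lemma inner_body_eq (n a acc b : Int) (hn : 0 ≤ n) (ha : 1 ≤ a) :
    (if 1 < Int.gcd a b then acc else asLoop2 n (a*a + b*b) a b (n.toNat + 1) acc 1)
      = acc + pairT n a b := by
  by_cases hg : 1 < Int.gcd a b
  · rw [if_pos hg]
    unfold pairT
    rw [if_neg (by omega), add_zero]
  · rw [if_neg hg]
    have hg1 : Int.gcd a b = 1 := by
      have hne : Int.gcd a b ≠ 0 := by
        intro h0
        rw [Int.gcd_eq_zero_iff] at h0
        omega
      omega
    have hcpos : (0:Int) < a*a + b*b := by nlinarith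
    rw [asLoop2_spec (n.toNat+1) n (a*a+b*b) a b 1 acc hn hcpos (le_refl 1)
      (by
        intro _
        have h1 : (0:Int) ≤ n / (n/((a*a+b*b)*1) + 1) := by
          apply Int.ediv_nonneg hn
          have := Int.ediv_nonneg hn (le_of_lt (by nlinarith : (0:Int) < (a*a+b*b)*1))
          omega
        linarith)
      (by have := Int.ediv_le_self (a*a+b*b) hn; omega)]
    unfold pairT innerP
    rw [if_pos hg1]

lemma inner_fold_eq (n a acc : Int) (hn : 0 ≤ n) (ha : 1 ≤ a) (hsq : 1 ≤ n - a*a) :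
    List.foldl (fun rv b => if 1 < Int.gcd a b then rv
        else asLoop2 n (a*a + b*b) a b (n.toNat + 1) rv 1) acc
      (PySem.List.pyRange (a+1) (pyCeilSqrt (n - a*a)) 1)
      = acc + pairRow n a := by
  rw [PySem.List.foldl_congr_mem _ _ (fun rv b => rv + pairT n a b) _
      (fun acc' b _ => inner_body_eq n a acc' b hn ha),
    PySem.List.foldl_add _ (fun b => pairT n a b),
    show pyCeilSqrt (n - a*a) = sqB (n - a*a) + 1 from by
      have := ceil_pred (n - a*a) hsq; omega,
    sum_map_pyRange (fun b => pairT n a b) (a+1) (sqB (n - a*a) + 1)]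
  rfl

lemma a_eq (n : Int) (hn : 0 ≤ n) : gaussian_sigma n = evenS n + pairS n := by
  simp only [gaussian_sigma, pow_two]
  rw [asLoop1_spec (n.toNat+1) n 1 0 hn (le_refl 1)
    (by
      intro _
      have h1 : (0:Int) ≤ n / (n/(2*1) + 1) := by
        apply Int.ediv_nonneg hn
        have := Int.ediv_nonneg hn (by norm_num : (0:Int) ≤ 2*1)
        omega
      linarith)
    (by have := Int.ediv_le_self 2 hn; omega)]
  rw [PySem.List.foldl_congr_mem _ _ (fun rv a => rv + pairRow n a) _
      (by
        intro acc a hmem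
        rw [PySem.List.mem_pyRange_one] at hmem
        exact inner_fold_eq n a acc hn hmem.1
          (aRange_sq n a hn hmem.1 (by omega))),
    PySem.List.foldl_add _ (fun a => pairRow n a),
    sum_map_pyRange (fun a => pairRow n a) 1 (pyIntSqrt n)]
  have hext : ∑ a ∈ Finset.Ico 1 (pyIntSqrt n), pairRow n a
      = ∑ a ∈ Finset.Ico 1 (sqB n + 1), pairRow n a := by
    rcases le_or_gt (pyIntSqrt n) 1 with hle | hgt
    · rw [Finset.Ico_eq_empty (by omega), Finset.sum_empty]
      refine (Finset.sum_eq_zero ?_).symm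
      intro a ha
      rw [Finset.mem_Ico] at ha
      exact row_zero n a hn ha.1 (by omega)
    · rw [sum_Ico_split 1 (pyIntSqrt n) (sqB n + 1) (by omega)
        (by have := sqA_le_sqB n hn; omega) (pairRow n)]
      have hz : ∑ a ∈ Finset.Ico (pyIntSqrt n) (sqB n + 1), pairRow n a = 0 := by
        apply Finset.sum_eq_zero
        intro a ha
        rw [Finset.mem_Ico] at ha
        exact row_zero n a hn (by omega) ha.1
      rw [hz, add_zero]
  rw [hext]
  unfold evenS pairS
  ring

lemma b_eq (n : Int) (hn : 0 ≤ n) : gaussian_sigma_alt n = evenS n + pairS n := by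
  have hsbn : sqB n ≤ ((n-1).toNat : Int) := by
    unfold sqB
    exact_mod_cast Nat.sqrt_le_self _
  unfold gaussian_sigma_alt
  rw [show (2:Int) = 2*1 from by norm_num,
    altEvenLoop_spec (n.toNat+1) n 1 0 hn (le_refl 1)
      (by have := Int.ediv_le_self 2 hn; omega),
    altALoop_spec (n.toNat+1) n 1 _ hn (le_refl 1) (by omega)]
  unfold evenS pairS
  ring

-- ===== VERDICT (by name: the statement is the Claim_ definition above) =====
theorem gaussian_sigma_spec : Claim_equal_gaussian_sigma := by
  intro n _ hpre
  unfold Spec_gaussian_sigma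
  rw [a_eq n hpre, b_eq n hpre]
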